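-- pv_equiv track=rewrite | github.com/HarshCasper/NeoAlgo | Python/dp/matrix_chain_multiplication.py | print_matrix_chain
-- ===== SOURCE A (Python) =====
-- def print_matrix_chain(S, i, j):
--     if i == j:
--         return " A_" + str(i) + " "
--     else:
--         s = "("
--         k = S[i][j]
--         s += print_matrix_chain(S, i, k)
--         s += print_matrix_chain(S, k + 1, j)
--         s += ")"
--         return s
-- ===== SOURCE B (Python) =====
-- def print_matrix_chain(S, i, j):
--     out = ""
--     stack = [("sub", i, j)]
--     while stack:
--         t = stack.pop()
--         if t[0] == "lit":
--             out += t[1]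
--         else:
--             _, a, b = t
--             if a == b:
--                 out += " A_" + str(a) + " "
--             else:
--                 k = S[a][b]
--                 stack.append(("lit", ")"))
--                 stack.append(("sub", k + 1, b))
--                 stack.append(("sub", a, k))
--                 stack.append(("lit", "("))
--     return out
-- ===== Notes on version B (the rewrite author's own statement) =====
-- stated objective: alternative
-- what changed: Replaces the recursive tree walk by an iterative loop over an explicit stack of literal/subproblem tokens, accumulating the output string left to right.
import Mathlib
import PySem

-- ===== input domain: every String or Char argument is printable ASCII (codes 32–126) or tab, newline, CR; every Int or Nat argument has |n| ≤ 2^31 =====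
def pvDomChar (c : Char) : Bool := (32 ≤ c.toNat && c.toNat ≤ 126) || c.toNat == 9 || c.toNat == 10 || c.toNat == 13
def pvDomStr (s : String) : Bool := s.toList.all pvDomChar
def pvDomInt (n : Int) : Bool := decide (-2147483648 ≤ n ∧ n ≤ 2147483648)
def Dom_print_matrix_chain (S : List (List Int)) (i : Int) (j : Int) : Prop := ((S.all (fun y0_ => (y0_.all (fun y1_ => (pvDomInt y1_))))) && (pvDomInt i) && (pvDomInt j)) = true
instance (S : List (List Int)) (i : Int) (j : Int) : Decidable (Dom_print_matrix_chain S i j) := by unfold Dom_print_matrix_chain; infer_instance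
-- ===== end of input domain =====

-- B replaces A's recursion by an iterative loop over an explicit stack of literal/subproblem
-- tokens (objective: alternative decomposition, same cost).

-- ===== PORT A =====
-- Recursion guarded by fuel ((j-i).toNat+1 suffices on Pre_); "" on fuel exhaustion or
-- IndexError (both excluded by Pre_).
def pmcA (fuel : Nat) (S : List (List Int)) (i j : Int) : String :=
  match fuel with
  | 0 => ""
  | f + 1 =>
    if i = j then " A_" ++ PySem.Int.toStr i ++ " "
    else
      match PySem.List.pyGet? S i with
      | none => ""
      | some row =>
        match PySem.List.pyGet? row j with
        | none => ""
        | some k => "(" ++ pmcA f S i k ++ pmcA f S (k + 1) j ++ ")"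

def print_matrix_chain (S : List (List Int)) (i : Int) (j : Int) : String :=
  pmcA ((j - i).toNat + 1) S i j

-- ===== PORT B =====
inductive PmcTok
  | lit : String → PmcTok
  | sub : Int → Int → PmcTok
deriving DecidableEq, Repr

-- the while loop over the explicit stack (head = top); fuel is only a totality guard
def pmcRun (fuel : Nat) (S : List (List Int)) (st : List PmcTok) (out : String) : String :=
  match fuel, st with
  | 0, _ => out
  | _ + 1, [] => out
  | f + 1, PmcTok.lit s :: rest => pmcRun f S rest (out ++ s)
  | f + 1, PmcTok.sub a b :: rest =>
    if a = b then pmcRun f S rest (out ++ " A_" ++ PySem.Int.toStr a ++ " ")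
    else
      match PySem.List.pyGet? S a with
      | none => out
      | some row =>
        match PySem.List.pyGet? row b with
        | none => out
        | some k =>
          pmcRun f S (PmcTok.lit "(" :: PmcTok.sub a k :: PmcTok.sub (k + 1) b ::
                      PmcTok.lit ")" :: rest) out

def print_matrix_chain_alt (S : List (List Int)) (i : Int) (j : Int) : String :=
  pmcRun (4 * (j - i).toNat + 4) S [PmcTok.sub i j] ""

-- ===== PRECONDITION & SPEC =====
-- Pre_ = inputs on which A terminates without IndexError for the function's purpose: i = j, or
-- 0 <= i <= j <= len(S) and every table entry S[p][q] in the window i <= p < q <= j is present and a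
-- valid split point (p <= S[p][q] < q), with j within the table when i < j; this slightly narrows
-- A's accidental domain (negative-index wraparound, lucky malformed tables) to the split-table
-- inputs the function is for.
def Pre_print_matrix_chain (S : List (List Int)) (i : Int) (j : Int) : Prop :=
  i = j ∨
  (0 ≤ i ∧ i ≤ j ∧ j ≤ (S.length : Int) ∧
  ((List.range (S.length + 1)).all fun p =>
    (List.range (S.length + 1)).all fun q =>
      !(decide (i ≤ (p : Int)) && decide (p < q) && decide ((q : Int) ≤ j)) ||
      (decide (p < S.length) && decide (q < (S[p]!).length) &&
       decide ((p : Int) ≤ (S[p]!)[q]!) && decide ((S[p]!)[q]! < (q : Int)))) = true)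
instance (S : List (List Int)) (i : Int) (j : Int) : Decidable (Pre_print_matrix_chain S i j) := by
  unfold Pre_print_matrix_chain; infer_instance

def pvWitness_print_matrix_chain : List (List Int) × Int × Int := ([[0, 0], [0, 0]], 0, 1)

def Spec_print_matrix_chain (S : List (List Int)) (i : Int) (j : Int) (out : String) : Prop := out = print_matrix_chain_alt S i j
instance (S : List (List Int)) (i : Int) (j : Int) (out : String) : Decidable (Spec_print_matrix_chain S i j out) := by unfold Spec_print_matrix_chain; infer_instance

-- ===== CLAIM (what is proved, stated in full; the proofs are below) =====
def Claim_equal_print_matrix_chain : Prop := ∀ (S : List (List Int)) (i : Int) (j : Int), Dom_print_matrix_chain S i j → Pre_print_matrix_chain S i j → Spec_print_matrix_chain S i j (print_matrix_chain S i j)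

-- ===== LEMMAS AND PROOFS =====

lemma pmcRun_nil (f : Nat) (S : List (List Int)) (out : String) :
    pmcRun f S [] out = out := by cases f <;> rfl

-- step lemmas for the loop body
lemma pmcRun_lit (f : Nat) (S : List (List Int)) (s : String) (rest : List PmcTok) (out : String) :
    pmcRun (f + 1) S (PmcTok.lit s :: rest) out = pmcRun f S rest (out ++ s) := rfl

lemma pmcRun_leaf (f : Nat) (S : List (List Int)) (a : Int) (rest : List PmcTok) (out : String) :
    pmcRun (f + 1) S (PmcTok.sub a a :: rest) out
      = pmcRun f S rest (out ++ (" A_" ++ PySem.Int.toStr a ++ " ")) := by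
  simp [pmcRun, String.append_assoc]

lemma pmcRun_split (f : Nat) (S : List (List Int)) (a b : Int) (rest : List PmcTok)
    (out : String) (h : a ≠ b) (row : List Int) (k : Int)
    (hr : PySem.List.pyGet? S a = some row) (hk : PySem.List.pyGet? row b = some k) :
    pmcRun (f + 1) S (PmcTok.sub a b :: rest) out
      = pmcRun f S (PmcTok.lit "(" :: PmcTok.sub a k :: PmcTok.sub (k + 1) b ::
                    PmcTok.lit ")" :: rest) out := by
  simp [pmcRun, h, hr, hk]

-- the central simulation lemma: popping a valid subproblem consumes a bounded number of
-- iterations and appends exactly A's string for that subproblem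
lemma pmcRun_sub (S : List (List Int)) :
    ∀ m : Nat, ∀ i j : Int, 0 ≤ i → i ≤ j →
    (∀ p q : Nat, i ≤ (p : Int) → p < q → (q : Int) ≤ j →
      p < S.length ∧ q < (S[p]!).length ∧ (p : Int) ≤ (S[p]!)[q]! ∧ (S[p]!)[q]! < (q : Int)) →
    (j - i).toNat ≤ m →
    ∃ used : Nat, used ≤ 4 * (j - i).toNat + 1 ∧
      ∀ fA : Nat, (j - i).toNat < fA →
      ∀ fuel : Nat, ∀ st : List PmcTok, ∀ out : String,
        pmcRun (used + fuel) S (PmcTok.sub i j :: st) out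
          = pmcRun fuel S st (out ++ pmcA fA S i j) := by
  intro m
  induction m with
  | zero =>
    intro i j hi hij _ hm
    have : i = j := by omega
    subst this
    refine ⟨1, by omega, ?_⟩
    intro fA hfA fuel st out
    obtain ⟨f, rfl⟩ : ∃ f, fA = f + 1 := ⟨fA - 1, by omega⟩
    rw [Nat.add_comm 1 fuel, pmcRun_leaf]
    simp [pmcA, String.append_assoc]
  | succ m ih =>
    intro i j hi hij htab hm
    by_cases hij' : i = j
    · subst hij'
      refine ⟨1, by omega, ?_⟩
      intro fA hfA fuel st out
      obtain ⟨f, rfl⟩ : ∃ f, fA = f + 1 := ⟨fA - 1, by omega⟩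
      rw [Nat.add_comm 1 fuel, pmcRun_leaf]
      simp [pmcA, String.append_assoc]
    · have hilt : i < j := lt_of_le_of_ne hij hij'
      set p := i.toNat with hp
      set q := j.toNat with hq
      have hpi : (p : Int) = i := Int.toNat_of_nonneg hi
      have hqj : (q : Int) = j := Int.toNat_of_nonneg (by omega)
      have hpq : p < q := by omega
      obtain ⟨hpn, hq2, hk1, hk2⟩ := htab p q (by omega) hpq (by omega)
      have hgp : S[p]! = S[p] := getElem!_pos S p hpn
      have hq2' : q < (S[p]).length := by rw [hgp] at hq2; exact hq2
      have hgq : (S[p]!)[q]! = (S[p])[q] := by rw [hgp]; exact getElem!_pos (S[p]) q hq2'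
      have hSp : PySem.List.pyGet? S i = some (S[p]) := by
        rw [← hpi, PySem.List.pyGet?_natCast]; exact List.getElem?_eq_getElem hpn
      have hSpq : PySem.List.pyGet? (S[p]) j = some ((S[p])[q]) := by
        rw [← hqj, PySem.List.pyGet?_natCast]; exact List.getElem?_eq_getElem hq2'
      set k : Int := (S[p])[q] with hk
      rw [hgq] at hk1 hk2
      have hik : i ≤ k := by omega
      have hkj : k < j := by omega
      obtain ⟨ul, hul, hulrun⟩ := ih i k hi hik
        (fun p' q' h1 h2 h3 => htab p' q' h1 h2 (by omega)) (by omega)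
      obtain ⟨ur, hur, hurrun⟩ := ih (k + 1) j (by omega) (by omega)
        (fun p' q' h1 h2 h3 => htab p' q' (by omega) h2 h3) (by omega)
      refine ⟨3 + ul + ur, by omega, ?_⟩
      intro fA hfA fuel st out
      obtain ⟨f, rfl⟩ : ∃ f, fA = f + 1 := ⟨fA - 1, by omega⟩
      have hfl : (k - i).toNat < f := by omega
      have hfr : (j - (k + 1)).toNat < f := by omega
      rw [show 3 + ul + ur + fuel = (2 + ul + ur + fuel) + 1 by omega,
          pmcRun_split _ _ _ _ _ _ hij' _ _ hSp hSpq,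
          show 2 + ul + ur + fuel = (1 + ul + ur + fuel) + 1 by omega,
          pmcRun_lit,
          show 1 + ul + ur + fuel = ul + (1 + ur + fuel) by omega,
          hulrun f hfl,
          show 1 + ur + fuel = ur + (1 + fuel) by omega,
          hurrun f hfr,
          Nat.add_comm 1 fuel,
          pmcRun_lit]
      have : pmcA (f + 1) S i j = "(" ++ pmcA f S i k ++ pmcA f S (k + 1) j ++ ")" := by
        simp [pmcA, hij', hSp, hSpq]
      rw [this]
      simp [String.append_assoc]

-- ===== VERDICT (by name: the statement is the Claim_ definition above) =====
theorem print_matrix_chain_spec : Claim_equal_print_matrix_chain := by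
  intro S i j _ hpre
  rcases hpre with heq | ⟨hi, hij, hj3, htab0⟩
  · subst heq
    unfold Spec_print_matrix_chain print_matrix_chain print_matrix_chain_alt
    have h0 : (i - i).toNat = 0 := by omega
    rw [h0]
    rw [show 4 * 0 + 4 = 3 + 1 by rfl, pmcRun_leaf, pmcRun_nil]
    simp [pmcA, String.append_assoc]
  simp only [List.all_eq_true, List.mem_range, Bool.or_eq_true, Bool.not_eq_eq_eq_not,
    Bool.and_eq_true, decide_eq_true_eq] at htab0
  unfold Spec_print_matrix_chain print_matrix_chain print_matrix_chain_alt
  obtain ⟨used, hused, hrun⟩ :=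
    pmcRun_sub S ((j - i).toNat) i j hi hij
      (fun p q h1 h2 h3 => by
        have hqlen : (q : Int) ≤ (S.length : Int) := by omega
        rcases htab0 p (by omega) q (by omega) with h | h
        · exact absurd h (by simp [h1, h2, h3])
        · exact ⟨h.1.1.1, h.1.1.2, h.1.2, h.2⟩) (le_refl _)
  have e : 4 * (j - i).toNat + 4 = used + (4 * (j - i).toNat + 4 - used) := by omega
  rw [e, hrun ((j - i).toNat + 1) (by omega), pmcRun_nil]
  simp
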